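-- pv_equiv track=rewrite | github.com/Harrison-1eo/BUAA_Cryptography_Lab | LAB2/9_hack2.py | adjugate_matrix
-- ===== SOURCE A (Python) =====
-- def adjugate_matrix(A):
--     n = len(A)
--     adj = [[0]*n for i in range(n)]
--
--     for i in range(n):
--         for j in range(n):
--             temp = []
--             for p in range(n):
--                 if p == i:
--                     continue
--                 row = []
--                 for q in range(n):
--                     if q == j:
--                         continue
--                     row.append(A[p][q])
--                 temp.append(row)
--             adj[j][i] = (-1)**(i+j) * determinant_matrix(temp)
--
--     return adj
--
-- def determinant_matrix(A):
--     n = len(A)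
--     if n == 1:
--         return A[0][0]
--     if n == 2:
--         return A[0][0]*A[1][1]-A[0][1]*A[1][0]
--
--     det = 0
--     for j in range(n):
--         temp = []
--         for i in range(1,n):
--             row = []
--             for k in range(n):
--                 if k == j:
--                     continue
--                 row.append(A[i][k])
--             temp.append(row)
--         det += (-1)**j * A[0][j] * determinant_matrix(temp)
--
--     return det
-- ===== SOURCE B (Python) =====
-- def adjugate_matrix(A):
--     n = len(A)
--     adj = [[0] * n for _ in range(n)]
--     for sign, p in _signed_perms(list(range(n))):
--         vals = [A[k][p[k]] for k in range(n)]
--         for i in range(n):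
--             adj[p[i]][i] += sign * _prod(vals[:i]) * _prod(vals[i + 1:])
--     return adj
--
-- def _signed_perms(cols):
--     if not cols:
--         return [(1, [])]
--     out = []
--     for idx in range(len(cols)):
--         rest = cols[:idx] + cols[idx + 1:]
--         for s, p in _signed_perms(rest):
--             out.append(((-1) ** idx * s, [cols[idx]] + p))
--     return out
--
-- def _prod(xs):
--     r = 1
--     for x in xs:
--         r *= x
--     return r
-- ===== Notes on version B (the rewrite author's own statement) =====
-- stated objective: alternative
-- what changed: B never forms minors or computes cofactor determinants: it enumerates all signed permutations of the column indices once (Leibniz formula) and, for each permutation p with sign s, adds s times the product of A[k][p[k]] over k!=i into adjugate cell (p[i],i) for every i, filling the whole table in one pass; A runs an independent recursive Laplace-expansion determinant on an (n-1)x(n-1) minor for each of the n^2 entries.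
-- intended difference: On 1x1 matrices A returns [[0]] because its determinant of the empty 0x0 minor falls through to 0, while B returns [[1]], the correct adjugate (the adjugate of any 1x1 matrix is the 1x1 identity). — e.g. on adjugate_matrix([[5]]): A returns [[0]], B returns [[1]]
-- outside the precondition, e.g. on adjugate_matrix([[]]): A returns [[0]], B raises IndexError
import Mathlib
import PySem

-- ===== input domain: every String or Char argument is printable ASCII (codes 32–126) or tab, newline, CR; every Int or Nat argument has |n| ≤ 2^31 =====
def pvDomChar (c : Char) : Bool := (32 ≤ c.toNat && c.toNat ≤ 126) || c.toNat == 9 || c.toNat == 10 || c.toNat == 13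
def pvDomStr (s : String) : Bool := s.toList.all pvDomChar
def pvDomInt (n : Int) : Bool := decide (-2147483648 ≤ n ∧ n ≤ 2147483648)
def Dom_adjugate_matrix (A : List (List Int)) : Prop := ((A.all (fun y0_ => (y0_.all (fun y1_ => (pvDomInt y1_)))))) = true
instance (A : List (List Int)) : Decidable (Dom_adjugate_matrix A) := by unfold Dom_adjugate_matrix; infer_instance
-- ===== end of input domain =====

-- B abandons A's per-entry cofactor scheme (a recursive Laplace-expansion determinant of an
-- (n-1)x(n-1) minor for each of the n^2 entries): it enumerates the signed permutations of the
-- column indices once and, for each permutation p with sign s, adds s * prod_{k≠i} A[k][p[k]]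
-- into cell (p[i], i) for every i, filling the whole table in a single pass (Leibniz formula).
-- Objective: alternative (comparable measured cost).

-- ===== PORT A =====
-- A[i][j] (always in range on admitted inputs)
def mfn (M : List (List Int)) (i j : Nat) : Int := (M.getD i []).getD j 0

-- 'temp' built inside determinant_matrix: rows 1..n-1, column j removed
def tempA (M : List (List Int)) (j : Nat) : List (List Int) :=
  ((List.range M.length).drop 1).map (fun i =>
    ((List.range M.length).filter (fun k => k ≠ j)).map (fun k => mfn M i k))

-- determinant_matrix: first-row Laplace expansion, explicit 1x1 / 2x2 base cases
def detA (M : List (List Int)) : Int :=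
  if M.length = 1 then mfn M 0 0
  else if M.length = 2 then mfn M 0 0 * mfn M 1 1 - mfn M 0 1 * mfn M 1 0
  else (List.range M.length).attach.foldl
    (fun det j => det + (-1 : Int) ^ j.1 * mfn M 0 j.1 * detA (tempA M j.1)) 0
termination_by M.length
decreasing_by
  have hj := List.mem_range.mp j.2
  simp [tempA]; omega

-- 'temp' built inside adjugate_matrix: row i and column j removed
def minorA (A : List (List Int)) (i j : Nat) : List (List Int) :=
  ((List.range A.length).filter (fun p => p ≠ i)).map (fun p =>
    ((List.range A.length).filter (fun q => q ≠ j)).map (fun q => mfn A p q))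

-- adj[j][i] = (-1)^(i+j) * det(minor); the filled table read back row by row
def adjugate_matrix (A : List (List Int)) : List (List Int) :=
  (List.range A.length).map (fun j =>
    (List.range A.length).map (fun i => (-1 : Int) ^ (i + j) * detA (minorA A i j)))

-- ===== PORT B =====
-- _signed_perms(cols): all permutations of cols, each with its sign, built by choosing the
-- head cols[idx] (sign factor (-1)^idx) and recursing on the remaining columns
def signedPerms (cols : List Nat) : List (Int × List Nat) :=
  if cols.isEmpty then [(1, [])]
  else (List.range cols.length).attach.flatMap (fun idx =>
    (signedPerms (cols.take idx.1 ++ cols.drop (idx.1 + 1))).map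
      (fun sp => ((-1 : Int) ^ idx.1 * sp.1, cols.getD idx.1 0 :: sp.2)))
termination_by cols.length
decreasing_by
  have hi := List.mem_range.mp idx.2
  simp only [List.length_append, List.length_take, List.length_drop]
  omega

-- _prod(xs): running product accumulator
def prodL (xs : List Int) : Int := xs.foldl (fun r x => r * x) 1

-- adj[r][c] += v
def setAdd (adj : List (List Int)) (r c : Nat) (v : Int) : List (List Int) :=
  adj.set r ((adj.getD r []).set c ((adj.getD r []).getD c 0 + v))

-- vals = [A[k][p[k]] for k in range(n)]
def valsOf (A : List (List Int)) (n : Nat) (p : List Nat) : List Int :=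
  (List.range n).map (fun k => (A.getD k []).getD (p.getD k 0) 0)

-- body of the outer loop: one permutation's contributions to every cell (p[i], i)
def permStep (A : List (List Int)) (n : Nat) (adj : List (List Int)) (sp : Int × List Nat) :
    List (List Int) :=
  (List.range n).foldl
    (fun a i => setAdd a (sp.2.getD i 0) i
      (sp.1 * prodL ((valsOf A n sp.2).take i) * prodL ((valsOf A n sp.2).drop (i + 1)))) adj

def adjugate_matrix_alt (A : List (List Int)) : List (List Int) :=
  (signedPerms (List.range A.length)).foldl (permStep A A.length)
    ((List.range A.length).map (fun _ => List.replicate A.length 0))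

-- ===== PRECONDITION & SPEC =====
-- Pre_ excludes exactly the matrices with a row shorter than n = len(A): for n ≥ 2 Python A
-- raises IndexError on them, and on the n = 1 input [[]] A still returns [[0]] (its only
-- row is never indexed) while B raises IndexError, so B cannot match there.
def Pre_adjugate_matrix (A : List (List Int)) : Prop :=
  ∀ r ∈ A, A.length ≤ r.length
instance (A : List (List Int)) : Decidable (Pre_adjugate_matrix A) := by
  unfold Pre_adjugate_matrix; infer_instance
def pvWitness_adjugate_matrix : List (List Int) := [[1, 2], [3, 4]]

-- On 1x1 matrices A returns [[0]] because its determinant of the empty 0x0 minor falls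
-- through to 0, while B returns [[1]], the correct adjugate of a 1x1 matrix (the 1x1 identity).
def D_adjugate_matrix (A : List (List Int)) : Prop := A.length = 1
instance (A : List (List Int)) : Decidable (D_adjugate_matrix A) := by
  unfold D_adjugate_matrix; infer_instance

def Spec_adjugate_matrix (A : List (List Int)) (out : List (List Int)) : Prop :=
  ¬ D_adjugate_matrix A → out = adjugate_matrix_alt A
instance (A : List (List Int)) (out : List (List Int)) : Decidable (Spec_adjugate_matrix A out) := by
  unfold Spec_adjugate_matrix; infer_instance

def pvDiffWitness_adjugate_matrix : List (List Int) := [[5]]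
def pvDiffWitnessOut_adjugate_matrix : (List (List Int)) × (List (List Int)) := ([[0]], [[1]])

-- ===== CLAIM (what is proved, stated in full; the proofs are below) =====
def Claim_unchanged_adjugate_matrix : Prop := ∀ (A : List (List Int)), Dom_adjugate_matrix A → Pre_adjugate_matrix A → Spec_adjugate_matrix A (adjugate_matrix A)
def Claim_changed_adjugate_matrix : Prop := Dom_adjugate_matrix (pvDiffWitness_adjugate_matrix) ∧ Pre_adjugate_matrix (pvDiffWitness_adjugate_matrix) ∧ D_adjugate_matrix (pvDiffWitness_adjugate_matrix) ∧ adjugate_matrix (pvDiffWitness_adjugate_matrix) = pvDiffWitnessOut_adjugate_matrix.1 ∧ adjugate_matrix_alt (pvDiffWitness_adjugate_matrix) = pvDiffWitnessOut_adjugate_matrix.2 ∧ pvDiffWitnessOut_adjugate_matrix.1 ≠ pvDiffWitnessOut_adjugate_matrix.2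
def Claim_exact_adjugate_matrix : Prop := ∀ (A : List (List Int)), Dom_adjugate_matrix A → Pre_adjugate_matrix A → D_adjugate_matrix A → adjugate_matrix A ≠ adjugate_matrix_alt A

-- ===== LEMMAS AND PROOFS =====

-- index map of "delete index j": q ↦ q (q < j), q ↦ q+1 (q ≥ j)
def skipIdx (j q : Nat) : Nat := if q < j then q else q + 1

-- the (first n columns of the first n rows of) M, as a Mathlib matrix
def matOf (n : Nat) (M : List (List Int)) : Matrix (Fin n) (Fin n) Int :=
  Matrix.of fun i j => mfn M i j

-- e_r as a row of length n
def eRow (n r : Nat) : List Int := (List.range n).map (fun q => if q = r then 1 else 0)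

theorem getD_map_range {α : Type} (m p : Nat) (f : Nat → α) (d : α) (hp : p < m) :
    ((List.range m).map f).getD p d = f p := by
  rw [List.getD_eq_getElem _ _ (by simpa using hp)]
  simp

theorem filter_range_ne (n j : Nat) (hj : j < n) :
    (List.range n).filter (fun k => k ≠ j) = (List.range (n - 1)).map (skipIdx j) := by
  induction n with
  | zero => omega
  | succ n ih =>
    rw [List.range_succ, List.filter_append]
    by_cases h : j = n
    · subst h
      have h1 : (List.range j).filter (fun k => k ≠ j) = List.range j := by
        rw [List.filter_eq_self]; intro a ha; simp at ha ⊢; omega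
      have h2 : (List.range j).map (skipIdx j) = List.range j := by
        have := List.map_congr_left (l := List.range j) (f := skipIdx j) (g := id)
          (fun x hx => by simp at hx; simp [skipIdx]; omega)
        simpa using this
      simp only [Nat.add_sub_cancel, h1, h2]
      simp
    · have hjn : j < n := by omega
      rw [ih hjn]
      have hr : List.range n = List.range (n-1) ++ [n-1] := by
        conv_lhs => rw [show n = (n-1)+1 by omega, List.range_succ]
      rw [show n + 1 - 1 = n from rfl, hr, List.map_append]
      have h3 : (List.filter (fun k => k ≠ j) [n]) = [n] := by simp; omega
      rw [h3]
      have hle : ¬ (n - 1 < j) := by omega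
      simp [skipIdx, hle]
      omega

theorem val_succAbove {n : Nat} (j : Fin (n + 1)) (q : Fin n) :
    (j.succAbove q : Nat) = skipIdx j.1 q.1 := by
  by_cases h : q.1 < j.1
  · rw [Fin.succAbove_of_castSucc_lt _ _ (by simpa [Fin.lt_def] using h)]
    simp [skipIdx, h]
  · rw [Fin.succAbove_of_le_castSucc _ _ (by simp [Fin.le_def]; omega)]
    simp [skipIdx, h]

theorem sum_map_range {β : Type} [AddCommMonoid β] (m : Nat) (g : Nat → β) :
    ((List.range m).map g).sum = ∑ k ∈ Finset.range m, g k := by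
  induction m with
  | zero => simp
  | succ m ih => simp [List.range_succ, Finset.sum_range_succ, ih]

theorem foldl_attach_sum {α : Type} (l : List α) (g : α → Int) :
    l.attach.foldl (fun acc x => acc + g x.1) 0 = (l.map g).sum := by
  rw [PySem.List.foldl_add]
  simp

theorem tempA_entry (M : List (List Int)) (n j p q : Nat) (hlen : M.length = n)
    (hj : j < n) (hp : p < n - 1) (hq : q < n - 1) :
    mfn (tempA M j) p q = mfn M (p + 1) (skipIdx j q) := by
  have h1 : (List.range n).drop 1 = (List.range (n - 1)).map Nat.succ := by
    conv_lhs => rw [show n = (n - 1) + 1 by omega, List.range_succ_eq_map]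
    simp
  show (((tempA M j).getD p []).getD q 0) = mfn M (p + 1) (skipIdx j q)
  unfold tempA
  rw [hlen, h1, List.map_map, getD_map_range _ _ _ _ hp]
  simp only [Function.comp]
  rw [filter_range_ne n j hj, List.map_map, getD_map_range _ _ _ _ hq]
  rfl

theorem tempA_len (M : List (List Int)) (n j : Nat) (hlen : M.length = n) (hj : j < n) :
    (tempA M j).length = n - 1 := by
  simp [tempA, hlen]

theorem tempA_rows (M : List (List Int)) (n j : Nat) (hlen : M.length = n) (hj : j < n) :
    ∀ r ∈ tempA M j, n - 1 ≤ r.length := by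
  intro r hr
  simp only [tempA, List.mem_map] at hr
  obtain ⟨i, _, rfl⟩ := hr
  rw [List.length_map, hlen, filter_range_ne n j hj, List.length_map, List.length_range]

theorem detA_eq : ∀ (n : Nat) (M : List (List Int)), 1 ≤ n → M.length = n →
    (∀ r ∈ M, n ≤ r.length) → detA M = (matOf n M).det := by
  intro n
  induction n using Nat.strong_induction_on with
  | _ n ih =>
  intro M h1 hlen hr
  match n, h1 with
  | 1, _ =>
    rw [detA, if_pos hlen, Matrix.det_fin_one]
    simp [matOf]
  | 2, _ =>
    rw [detA, if_neg (by omega), if_pos hlen, Matrix.det_fin_two]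
    simp [matOf, mfn]
  | (m + 3), _ =>
    rw [detA, if_neg (by omega), if_neg (by omega)]
    rw [foldl_attach_sum _ (fun j => (-1 : Int) ^ j * mfn M 0 j * detA (tempA M j))]
    rw [hlen, sum_map_range, ← Fin.sum_univ_eq_sum_range]
    rw [Matrix.det_succ_row_zero]
    apply Finset.sum_congr rfl
    intro j _
    have hj : j.1 < m + 3 := j.2
    have hA : detA (tempA M j.1) = (matOf (m + 2) (tempA M j.1)).det := by
      apply ih (m + 2) (by omega) _ (by omega)
        (by rw [tempA_len M (m+3) j.1 hlen hj]; omega)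
        (fun r hrr => tempA_rows M (m+3) j.1 hlen hj r hrr)
    have hsub : matOf (m + 2) (tempA M j.1) =
        (matOf (m + 3) M).submatrix Fin.succ j.succAbove := by
      ext p q
      show mfn (tempA M j.1) p.1 q.1 = mfn M (Fin.succ p).1 (j.succAbove q).1
      rw [tempA_entry M (m+3) j.1 p.1 q.1 hlen hj (by omega) (by omega)]
      rw [val_succAbove]
      rfl
    rw [hA, hsub]
    show (-1 : Int) ^ j.1 * mfn M 0 j.1 * _ = _
    congr 1

-- ---------- generic list helpers ----------

theorem sum_flatMap' {α : Type} (l : List α) (f : α → List Int) :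
    (l.flatMap f).sum = (l.map (fun x => (f x).sum)).sum := by
  induction l with
  | nil => simp
  | cons a l ih => simp [List.flatMap_cons, List.sum_append, ih]

theorem flatMap_attach_eq {α β : Type} (l : List α) (g : α → List β) :
    (l.attach.flatMap (fun x => g x.1)) = l.flatMap g := by
  induction l with
  | nil => simp
  | cons a l ih =>
    rw [List.attach_cons, List.flatMap_cons, List.flatMap_cons, List.flatMap_map]
    simp only [ih]

theorem sum_map_attach_flatMap {β : Type} (l : List Nat) (F : Nat → List β) (g : β → Int) :
    (((l.attach.flatMap (fun idx => F idx.1))).map g).sum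
      = (l.map (fun i => ((F i).map g).sum)).sum := by
  rw [flatMap_attach_eq, List.map_flatMap, sum_flatMap']

theorem sum_map_mul_left' {α : Type} (l : List α) (a : Int) (f : α → Int) :
    (l.map (fun x => a * f x)).sum = a * (l.map f).sum := by
  induction l with
  | nil => simp
  | cons x l ih => simp [ih]; ring

theorem prodL_eq (xs : List Int) : prodL xs = xs.prod := by
  rw [List.prod_eq_foldl]
  rfl

theorem mem_drop_range (n m x : Nat) (h : x ∈ (List.range n).drop m) : m ≤ x := by
  rw [List.mem_iff_getElem] at h
  obtain ⟨j, hj, hx⟩ := h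
  rw [List.getElem_drop] at hx
  simp at hx
  omega

theorem mfn_drop_one (M : List (List Int)) (k j : Nat) :
    mfn (M.drop 1) k j = mfn M (k + 1) j := by
  unfold mfn
  congr 1
  show ((M.drop 1)[k]?).getD [] = (M[k+1]?).getD []
  rw [List.getElem?_drop]
  rw [Nat.add_comm 1 k]

theorem prod_split (n c : Nat) (hc : c < n) (f : Nat → Int) :
    ((List.range n).map f).prod =
      (((List.range n).map f).take c).prod * f c * (((List.range n).map f).drop (c + 1)).prod := by
  have hL : ((List.range n).map f).length = n := by simp
  have h2 : ((List.range n).map f).drop c = f c :: ((List.range n).map f).drop (c + 1) := by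
    rw [List.drop_eq_getElem_cons (by omega)]
    congr 1
    simp
  calc ((List.range n).map f).prod
      = (((List.range n).map f).take c ++ ((List.range n).map f).drop c).prod := by
        rw [List.take_append_drop]
    _ = (((List.range n).map f).take c).prod * (((List.range n).map f).drop c).prod :=
        List.prod_append
    _ = _ := by rw [h2, List.prod_cons]; ring

-- getD through take ++ drop: deleting index idx
theorem getD_take_drop (cols : List Nat) (idx q : Nat) (hidx : idx < cols.length)
    (hq : q < cols.length - 1) :
    (cols.take idx ++ cols.drop (idx + 1)).getD q 0 = cols.getD (skipIdx idx q) 0 := by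
  have htk : (cols.take idx).length = idx := by simp; omega
  by_cases h : q < idx
  · rw [List.getD_eq_getElem _ _ (by simp; omega), List.getElem_append_left (by rw [htk]; omega),
      List.getElem_take, List.getD_eq_getElem _ _ (by unfold skipIdx; split <;> omega)]
    congr 1
    unfold skipIdx
    split <;> omega
  · rw [List.getD_eq_getElem _ _ (by simp; omega),
      List.getElem_append_right (by rw [htk]; omega),
      List.getD_eq_getElem _ _ (by unfold skipIdx; split <;> omega)]
    rw [List.getElem_drop]
    congr 1
    rw [htk]
    unfold skipIdx
    split <;> omega

-- ---------- signedPerms facts ----------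

theorem signedPerms_perm : ∀ (m : Nat) (cols : List Nat), cols.length = m →
    ∀ sp ∈ signedPerms cols, sp.2.Perm cols := by
  intro m
  induction m using Nat.strong_induction_on with
  | _ m ih =>
  intro cols hlen sp hsp
  by_cases hc : cols = []
  · subst hc
    rw [signedPerms] at hsp
    simp at hsp
    simp [hsp]
  · rw [signedPerms, if_neg (by simpa using hc)] at hsp
    rw [List.mem_flatMap] at hsp
    obtain ⟨idx, _, hmem⟩ := hsp
    rw [List.mem_map] at hmem
    obtain ⟨sp', hsp', rfl⟩ := hmem
    have hidx : idx.1 < cols.length := List.mem_range.mp idx.2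
    have hm1 : 1 ≤ m := by
      rcases cols with _ | _
      · exact absurd rfl hc
      · simp at hlen; omega
    have hrest : (cols.take idx.1 ++ cols.drop (idx.1 + 1)).length = m - 1 := by
      simp only [List.length_append, List.length_take, List.length_drop]
      omega
    have hperm' : sp'.2.Perm (cols.take idx.1 ++ cols.drop (idx.1 + 1)) :=
      ih (m - 1) (by omega) _ hrest sp' hsp'
    show (cols.getD idx.1 0 :: sp'.2).Perm cols
    have hget : cols.getD idx.1 0 = cols[idx.1] := List.getD_eq_getElem _ _ hidx
    have hcols : cols = cols.take idx.1 ++ cols[idx.1] :: cols.drop (idx.1 + 1) := by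
      conv_lhs => rw [← List.take_append_drop idx.1 cols]
      rw [List.drop_eq_getElem_cons hidx]
    have step1 : (cols.getD idx.1 0 :: sp'.2).Perm
        (cols.getD idx.1 0 :: (cols.take idx.1 ++ cols.drop (idx.1 + 1))) :=
      List.Perm.cons _ hperm'
    have step2 : (cols.getD idx.1 0 :: (cols.take idx.1 ++ cols.drop (idx.1 + 1))).Perm cols := by
      rw [hget]
      conv_rhs => rw [hcols]
      exact List.perm_middle.symm
    exact step1.trans step2

theorem signedPerms_len (n : Nat) (sp : Int × List Nat)
    (h : sp ∈ signedPerms (List.range n)) : sp.2.length = n := by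
  have := (signedPerms_perm n (List.range n) (by simp) sp h).length_eq
  simpa using this

theorem signedPerms_lt (n : Nat) (sp : Int × List Nat)
    (h : sp ∈ signedPerms (List.range n)) : ∀ i, i < n → sp.2.getD i 0 < n := by
  intro i hi
  have hlen := signedPerms_len n sp h
  have hmem : sp.2.getD i 0 ∈ sp.2 := by
    rw [List.getD_eq_getElem _ _ (by omega)]
    exact List.getElem_mem _
  have := (signedPerms_perm n (List.range n) (by simp) sp h).mem_iff.mp hmem
  exact List.mem_range.mp this

-- ---------- the table: shape and entries ----------

def Shape (n : Nat) (adj : List (List Int)) : Prop :=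
  adj.length = n ∧ ∀ row ∈ adj, row.length = n

theorem shape_setAdd (n : Nat) (adj : List (List Int)) (r c : Nat) (v : Int)
    (hs : Shape n adj) (hr : r < n) : Shape n (setAdd adj r c v) := by
  obtain ⟨h1, h2⟩ := hs
  constructor
  · simp [setAdd, h1]
  · intro row hrow
    unfold setAdd at hrow
    rcases List.mem_or_eq_of_mem_set hrow with h | h
    · exact h2 row h
    · subst h
      rw [List.length_set]
      exact h2 _ (by rw [List.getD_eq_getElem _ _ (by omega)]; exact List.getElem_mem _)

theorem mfn_setAdd (n : Nat) (adj : List (List Int)) (r c : Nat) (v : Int)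
    (hs : Shape n adj) (hr : r < n) (r' c' : Nat) (hr' : r' < n) (hc' : c' < n) :
    mfn (setAdd adj r c v) r' c' =
      mfn adj r' c' + if r' = r ∧ c' = c ∧ c < n then v else 0 := by
  obtain ⟨h1, h2⟩ := hs
  have hrlen : r < adj.length := by omega
  have hrowlen : (adj.getD r []).length = n :=
    h2 _ (by rw [List.getD_eq_getElem _ _ hrlen]; exact List.getElem_mem _)
  unfold setAdd
  show ((((adj.set r ((adj.getD r []).set c ((adj.getD r []).getD c 0 + v)))[r']?).getD []).getD
      c' 0) = ((adj[r']?).getD []).getD c' 0 + _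
  by_cases he : r' = r
  · subst he
    rw [List.getElem?_set_self (by omega)]
    simp only [Option.getD_some]
    by_cases hcc : c' = c
    · subst hcc
      have hcn : c' < (adj.getD r' []).length := by omega
      show (((adj.getD r' []).set c' ((adj.getD r' []).getD c' 0 + v))[c']?).getD 0 = _
      rw [List.getElem?_set_self hcn]
      simp only [Option.getD_some]
      rw [if_pos (show True ∧ True ∧ c' < n from ⟨trivial, trivial, hc'⟩)]
      rw [List.getElem?_eq_getElem (show r' < adj.length by omega),
        List.getD_eq_getElem _ _ (show r' < adj.length by omega)]
      simp [List.getD_eq_getElem?_getD]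
    · show (((adj.getD r' []).set c ((adj.getD r' []).getD c 0 + v))[c']?).getD 0 = _
      rw [List.getElem?_set_ne (show c ≠ c' by omega)]
      rw [if_neg (fun h => hcc h.2.1)]
      rw [List.getElem?_eq_getElem (show r' < adj.length by omega),
        List.getD_eq_getElem _ _ (show r' < adj.length by omega)]
      simp [List.getD_eq_getElem?_getD]
  · rw [List.getElem?_set_ne (by omega)]
    rw [if_neg (fun h => he h.1)]
    simp

theorem foldl_setAdd (n : Nat) (ρ : Nat → Nat) (w : Nat → Int) :
    ∀ (l : List Nat) (adj : List (List Int)), Shape n adj → (∀ i ∈ l, ρ i < n) →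
      Shape n (l.foldl (fun a i => setAdd a (ρ i) i (w i)) adj) ∧
      ∀ r c, r < n → c < n →
        mfn (l.foldl (fun a i => setAdd a (ρ i) i (w i)) adj) r c =
          mfn adj r c + (l.map (fun i => if r = ρ i ∧ c = i ∧ i < n then w i else 0)).sum := by
  intro l
  induction l with
  | nil => intro adj hs _; exact ⟨hs, by simp⟩
  | cons i l ihl =>
    intro adj hs hρ
    have hρi : ρ i < n := hρ i (by simp)
    have hs' : Shape n (setAdd adj (ρ i) i (w i)) := shape_setAdd n adj _ _ _ hs hρi
    obtain ⟨hsf, hent⟩ := ihl (setAdd adj (ρ i) i (w i)) hs' (fun x hx => hρ x (by simp [hx]))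
    refine ⟨hsf, ?_⟩
    intro r c hrn hcn
    rw [List.foldl_cons, hent r c hrn hcn,
      mfn_setAdd n adj (ρ i) i (w i) hs hρi r c hrn hcn]
    simp only [List.map_cons, List.sum_cons]
    by_cases h : r = ρ i ∧ c = i ∧ i < n
    · simp only [if_pos h]
      ring
    · simp only [if_neg h]
      ring

theorem range_sum_pick (n c : Nat) (hc : c < n) (f : Nat → Int) :
    ((List.range n).map (fun i => if c = i then f i else 0)).sum = f c := by
  rw [sum_map_range, Finset.sum_ite_eq (Finset.range n) c f]
  simp [hc]

theorem foldl_permStep (A : List (List Int)) (n : Nat) :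
    ∀ (perms : List (Int × List Nat)) (adj : List (List Int)), Shape n adj →
      (∀ sp ∈ perms, ∀ i, i < n → sp.2.getD i 0 < n) →
      Shape n (perms.foldl (permStep A n) adj) ∧
      ∀ r c, r < n → c < n →
        mfn (perms.foldl (permStep A n) adj) r c =
          mfn adj r c + (perms.map (fun sp =>
            if r = sp.2.getD c 0 then
              sp.1 * prodL ((valsOf A n sp.2).take c) * prodL ((valsOf A n sp.2).drop (c + 1))
            else 0)).sum := by
  intro perms
  induction perms with
  | nil => intro adj hs _; exact ⟨hs, by simp⟩
  | cons sp perms ihp =>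
    intro adj hs hbound
    have hb1 : ∀ i ∈ List.range n, sp.2.getD i 0 < n := by
      intro i hi
      exact hbound sp (by simp) i (List.mem_range.mp hi)
    obtain ⟨hs1, hent1⟩ := foldl_setAdd n (fun i => sp.2.getD i 0)
      (fun i => sp.1 * prodL ((valsOf A n sp.2).take i) * prodL ((valsOf A n sp.2).drop (i + 1)))
      (List.range n) adj hs hb1
    obtain ⟨hsf, hentf⟩ := ihp (permStep A n adj sp) hs1
      (fun x hx => hbound x (by simp [hx]))
    refine ⟨hsf, ?_⟩
    intro r c hrn hcn
    rw [List.foldl_cons, hentf r c hrn hcn]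
    show mfn (permStep A n adj sp) r c + _ = _
    unfold permStep
    rw [hent1 r c hrn hcn]
    simp only [List.map_cons, List.sum_cons]
    have hcong : ((List.range n).map (fun i =>
        if r = sp.2.getD i 0 ∧ c = i ∧ i < n then
          sp.1 * prodL ((valsOf A n sp.2).take i) * prodL ((valsOf A n sp.2).drop (i + 1))
        else 0)) = ((List.range n).map (fun i =>
        if c = i then (if r = sp.2.getD i 0 then
          sp.1 * prodL ((valsOf A n sp.2).take i) * prodL ((valsOf A n sp.2).drop (i + 1))
        else 0) else 0)) := by
      apply List.map_congr_left
      intro i hi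
      have hin : i < n := List.mem_range.mp hi
      by_cases h1 : c = i <;> by_cases h2 : r = sp.2.getD i 0 <;> simp [h1, h2, hin]
    rw [hcong, range_sum_pick n c hcn]
    ring

theorem shape_init (n : Nat) :
    Shape n ((List.range n).map (fun _ => List.replicate n (0 : Int))) := by
  constructor
  · simp
  · intro row hrow
    rw [List.mem_map] at hrow
    obtain ⟨_, _, rfl⟩ := hrow
    simp

theorem mfn_init (n : Nat) (r c : Nat) :
    mfn ((List.range n).map (fun _ => List.replicate n (0 : Int))) r c = 0 := by
  unfold mfn
  by_cases hr : r < n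
  · rw [getD_map_range _ _ _ _ hr]
    by_cases hc : c < n
    · rw [List.getD_eq_getElem _ _ (by simp; omega)]; simp
    · rw [List.getD_eq_default _ _ (by simp; omega)]
  · rw [show ((List.range n).map (fun _ => List.replicate n (0 : Int))).getD r [] = []
      from List.getD_eq_default _ _ (by simp; omega)]
    simp

-- ---------- Leibniz sum = determinant ----------

theorem sumPerms_det : ∀ (m : Nat) (M : List (List Int)) (cols : List Nat), cols.length = m →
    ((signedPerms cols).map (fun sp =>
      sp.1 * ((List.range m).map (fun k => mfn M k (sp.2.getD k 0))).prod)).sum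
    = (Matrix.of fun (p q : Fin m) => mfn M p.1 (cols.getD q.1 0)).det := by
  intro m
  induction m using Nat.strong_induction_on with
  | _ m ih =>
  intro M cols hlen
  match m with
  | 0 =>
    have hc : cols = [] := List.length_eq_zero_iff.mp hlen
    subst hc
    rw [signedPerms]
    simp [Matrix.det_isEmpty]
  | (m' + 1) =>
    have hcne : ¬ cols.isEmpty = true := by
      rw [List.isEmpty_iff]
      intro h; subst h; simp at hlen
    rw [signedPerms, if_neg hcne]
    rw [sum_map_attach_flatMap (List.range cols.length)
      (fun i => (signedPerms (cols.take i ++ cols.drop (i + 1))).map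
        (fun sp => ((-1 : Int) ^ i * sp.1, cols.getD i 0 :: sp.2)))
      (fun sp => sp.1 * ((List.range (m' + 1)).map (fun k => mfn M k (sp.2.getD k 0))).prod)]
    rw [hlen, sum_map_range, ← Fin.sum_univ_eq_sum_range, Matrix.det_succ_row_zero]
    apply Finset.sum_congr rfl
    intro j _
    have hj : j.1 < m' + 1 := j.2
    rw [List.map_map]
    have hterm : ∀ sp' : Int × List Nat,
        ((fun sp => sp.1 * ((List.range (m' + 1)).map (fun k => mfn M k (sp.2.getD k 0))).prod) ∘
          (fun sp => ((-1 : Int) ^ j.1 * sp.1, cols.getD j.1 0 :: sp.2))) sp'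
        = ((-1 : Int) ^ j.1 * mfn M 0 (cols.getD j.1 0)) *
            (sp'.1 * ((List.range m').map (fun k => mfn (M.drop 1) k (sp'.2.getD k 0))).prod) := by
      intro sp'
      show ((-1 : Int) ^ j.1 * sp'.1) *
          ((List.range (m' + 1)).map
            (fun k => mfn M k ((cols.getD j.1 0 :: sp'.2).getD k 0))).prod = _
      rw [List.range_succ_eq_map, List.map_cons, List.prod_cons, List.map_map]
      have hmapeq : ((List.range m').map
          ((fun k => mfn M k ((cols.getD j.1 0 :: sp'.2).getD k 0)) ∘ Nat.succ))
          = (List.range m').map (fun k => mfn (M.drop 1) k (sp'.2.getD k 0)) := by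
        apply List.map_congr_left
        intro k _
        show mfn M (k + 1) (sp'.2.getD k 0) = mfn (M.drop 1) k (sp'.2.getD k 0)
        rw [mfn_drop_one]
      rw [hmapeq]
      show ((-1 : Int) ^ j.1 * sp'.1) * (mfn M 0 (cols.getD j.1 0) * _) = _
      ring
    rw [List.map_congr_left (fun sp' _ => hterm sp')]
    rw [sum_map_mul_left']
    have hrest : (cols.take j.1 ++ cols.drop (j.1 + 1)).length = m' := by
      simp only [List.length_append, List.length_take, List.length_drop]
      omega
    rw [ih m' (by omega) (M.drop 1) _ hrest]
    have hsub : (Matrix.of fun (p q : Fin m') =>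
        mfn (M.drop 1) p.1 ((cols.take j.1 ++ cols.drop (j.1 + 1)).getD q.1 0))
        = (Matrix.of fun (p q : Fin (m' + 1)) => mfn M p.1 (cols.getD q.1 0)).submatrix
            Fin.succ j.succAbove := by
      ext p q
      show mfn (M.drop 1) p.1 ((cols.take j.1 ++ cols.drop (j.1 + 1)).getD q.1 0)
        = mfn M (Fin.succ p).1 (cols.getD (j.succAbove q).1 0)
      rw [mfn_drop_one, getD_take_drop cols j.1 q.1 (by omega) (by omega), val_succAbove]
      rfl
    rw [hsub]
    simp only [Matrix.of_apply, Fin.val_zero]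
    try ring

-- ---------- per-entry characterisation of B ----------

theorem term_eq (A : List (List Int)) (n r c : Nat) (hn : A.length = n)
    (hr : r < n) (hc : c < n) (sp : Int × List Nat) (hsp : sp ∈ signedPerms (List.range n)) :
    (if r = sp.2.getD c 0 then
      sp.1 * prodL ((valsOf A n sp.2).take c) * prodL ((valsOf A n sp.2).drop (c + 1))
    else 0)
    = sp.1 * ((List.range n).map
        (fun k => mfn (A.set c (eRow n r)) k (sp.2.getD k 0))).prod := by
  have hpc : sp.2.getD c 0 < n := signedPerms_lt n sp hsp c hc
  have hvals : valsOf A n sp.2 = (List.range n).map (fun k => mfn A k (sp.2.getD k 0)) := rfl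
  have hgf : ∀ k, k ≠ c → mfn (A.set c (eRow n r)) k (sp.2.getD k 0)
      = mfn A k (sp.2.getD k 0) := by
    intro k hk
    unfold mfn
    congr 1
    show ((A.set c (eRow n r))[k]?).getD [] = (A[k]?).getD []
    rw [List.getElem?_set_ne (by omega)]
  have hgc : mfn (A.set c (eRow n r)) c (sp.2.getD c 0)
      = if sp.2.getD c 0 = r then 1 else 0 := by
    unfold mfn
    have h1 : ((A.set c (eRow n r))[c]?).getD [] = eRow n r := by
      rw [List.getElem?_set_self (by omega)]
      rfl
    show (((A.set c (eRow n r))[c]?).getD []).getD (sp.2.getD c 0) 0 = _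
    rw [h1]
    exact getD_map_range n (sp.2.getD c 0) _ 0 hpc
  have htake : (((List.range n).map (fun k => mfn (A.set c (eRow n r)) k (sp.2.getD k 0))).take c)
      = ((valsOf A n sp.2).take c) := by
    rw [hvals, ← List.map_take, ← List.map_take, List.take_range]
    apply List.map_congr_left
    intro k hk
    have : k < min c n := List.mem_range.mp hk
    exact hgf k (by omega)
  have hdrop : (((List.range n).map (fun k => mfn (A.set c (eRow n r)) k (sp.2.getD k 0))).drop (c + 1))
      = ((valsOf A n sp.2).drop (c + 1)) := by
    rw [hvals, ← List.map_drop, ← List.map_drop]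
    apply List.map_congr_left
    intro k hk
    have := mem_drop_range n (c + 1) k hk
    exact hgf k (by omega)
  rw [prod_split n c hc (fun k => mfn (A.set c (eRow n r)) k (sp.2.getD k 0)), htake, hdrop, hgc]
  rw [prodL_eq, prodL_eq]
  by_cases h : r = sp.2.getD c 0
  · rw [if_pos h, if_pos h.symm]
    ring
  · rw [if_neg h, if_neg (fun hh => h hh.symm)]
    ring

theorem bShape (A : List (List Int)) (n : Nat) (hn : A.length = n) :
    Shape n (adjugate_matrix_alt A) := by
  unfold adjugate_matrix_alt
  rw [hn]
  exact (foldl_permStep A n (signedPerms (List.range n)) _ (shape_init n)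
    (fun sp h i hi => signedPerms_lt n sp h i hi)).1

theorem bEntry (A : List (List Int)) (n : Nat) (hn : A.length = n) (r c : Nat)
    (hr : r < n) (hc : c < n) :
    mfn (adjugate_matrix_alt A) r c = (matOf n (A.set c (eRow n r))).det := by
  unfold adjugate_matrix_alt
  rw [hn]
  obtain ⟨hs, hent⟩ := foldl_permStep A n (signedPerms (List.range n)) _ (shape_init n)
    (fun sp h i hi => signedPerms_lt n sp h i hi)
  rw [hent r c hr hc, mfn_init, zero_add]
  rw [List.map_congr_left (fun sp hsp => term_eq A n r c hn hr hc sp hsp)]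
  rw [sumPerms_det n (A.set c (eRow n r)) (List.range n) (by simp)]
  congr 1
  ext p q
  show mfn (A.set c (eRow n r)) p.1 ((List.range n).getD q.1 0) = mfn (A.set c (eRow n r)) p.1 q.1
  congr 1
  rw [List.getD_eq_getElem _ _ (by simpa using q.2)]
  simp

theorem det_MB (A : List (List Int)) (n : Nat) (hn : A.length = n) (r c : Nat)
    (hr : r < n) (hc : c < n) :
    (matOf n (A.set c (eRow n r))).det = Matrix.adjugate (matOf n A) ⟨r, hr⟩ ⟨c, hc⟩ := by
  rw [Matrix.adjugate_apply]
  congr 1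
  ext p q
  rw [Matrix.updateRow_apply]
  by_cases hp : p = (⟨c, hc⟩ : Fin n)
  · rw [if_pos hp]
    have hpc : p.1 = c := by rw [hp]
    have hval : matOf n (A.set c (eRow n r)) p q = (if q.1 = r then (1 : Int) else 0) := by
      show mfn (A.set c (eRow n r)) p.1 q.1 = _
      rw [hpc]
      have h1 : ((A.set c (eRow n r))[c]?).getD [] = eRow n r := by
        rw [List.getElem?_set_self (by omega)]
        rfl
      show (((A.set c (eRow n r))[c]?).getD []).getD q.1 0 = _
      rw [h1]
      exact getD_map_range n q.1 _ 0 q.2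
    rw [hval, Pi.single_apply]
    simp [Fin.ext_iff]
  · rw [if_neg hp]
    show mfn (A.set c (eRow n r)) p.1 q.1 = mfn A p.1 q.1
    have hpc : p.1 ≠ c := fun h => hp (Fin.ext h)
    unfold mfn
    congr 1
    show ((A.set c (eRow n r))[p.1]?).getD [] = (A[p.1]?).getD []
    rw [List.getElem?_set_ne (by omega)]

-- ---------- per-entry characterisation of A ----------

theorem entry_final (A : List (List Int)) (m : Nat) (hn : A.length = m + 2)
    (r c : Nat) (hr : r < m + 2) (hc : c < m + 2) :
    (-1 : Int) ^ (c + r) * detA (minorA A c r) =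
      Matrix.adjugate (matOf (m + 2) A) ⟨r, hr⟩ ⟨c, hc⟩ := by
  have hminor : minorA A c r = (List.range (m + 1)).map (fun p =>
      (List.range (m + 1)).map (fun q => mfn A (skipIdx c p) (skipIdx r q))) := by
    unfold minorA
    rw [hn, filter_range_ne (m + 2) c hc, filter_range_ne (m + 2) r hr]
    rw [List.map_map]
    apply List.map_congr_left
    intro p _
    show List.map (fun q => mfn A (skipIdx c p) q)
        (List.map (skipIdx r) (List.range (m + 2 - 1)))
      = List.map (fun q => mfn A (skipIdx c p) (skipIdx r q)) (List.range (m + 1))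
    rw [List.map_map]
    rfl
  have hdet : detA (minorA A c r) = (matOf (m + 1) (minorA A c r)).det := by
    apply detA_eq (m + 1) _ (by omega) (by rw [hminor]; simp)
    rw [hminor]
    intro row hrow
    obtain ⟨p, _, rfl⟩ := List.mem_map.mp hrow
    simp
  have hsub : matOf (m + 1) (minorA A c r) =
      (matOf (m + 2) A).submatrix (Fin.succAbove ⟨c, hc⟩) (Fin.succAbove ⟨r, hr⟩) := by
    ext p q
    show mfn (minorA A c r) p.1 q.1
      = mfn A ((⟨c, hc⟩ : Fin (m + 2)).succAbove p).1 ((⟨r, hr⟩ : Fin (m + 2)).succAbove q).1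
    rw [hminor]
    show ((((List.range (m + 1)).map _).getD p.1 []).getD q.1 0) = _
    rw [getD_map_range _ _ _ _ p.2, getD_map_range _ _ _ _ q.2, val_succAbove, val_succAbove]
  rw [Matrix.adjugate_fin_succ_eq_det_submatrix, hdet, hsub]

-- entry access through the list structure
theorem mfn_eq_getElem (adj : List (List Int)) (r c : Nat) (h1 : r < adj.length)
    (h2 : c < adj[r].length) : mfn adj r c = adj[r][c] := by
  unfold mfn
  rw [List.getD_eq_getElem _ _ h1, List.getD_eq_getElem _ _ h2]

theorem main_eq (A : List (List Int)) (m : Nat) (hn : A.length = m + 2) :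
    adjugate_matrix A = adjugate_matrix_alt A := by
  obtain ⟨hblen, hbrows⟩ := bShape A (m + 2) hn
  have hArw : adjugate_matrix A = (List.range (m + 2)).map (fun j =>
      (List.range (m + 2)).map (fun i => (-1 : Int) ^ (i + j) * detA (minorA A i j))) := by
    unfold adjugate_matrix
    rw [hn]
  apply List.ext_getElem (by rw [hArw, hblen]; simp)
  intro r h1 h2
  have hrn : r < m + 2 := hblen ▸ h2
  apply List.ext_getElem (by
    simp only [hArw, List.getElem_map, List.getElem_range, List.length_map, List.length_range]
    exact (hbrows _ (List.getElem_mem _)).symm)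
  intro c hc1 hc2
  have hbrowlen : (adjugate_matrix_alt A)[r].length = m + 2 :=
    hbrows _ (List.getElem_mem _)
  have hcn : c < m + 2 := hbrowlen ▸ hc2
  simp only [hArw, List.getElem_map, List.getElem_range]
  rw [entry_final A m hn r c hrn hcn, ← det_MB A (m + 2) hn r c hrn hcn,
    ← bEntry A (m + 2) hn r c hrn hcn]
  exact mfn_eq_getElem _ r c (by omega) (by omega)

-- the 1×1 witnesses
theorem detA_nil : detA [] = 0 := by
  rw [detA]; simp

theorem adj_one (r : List Int) : adjugate_matrix [r] = [[0]] := by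
  have h1 : minorA [r] 0 0 = [] := by simp [minorA, List.range_one]
  simp [adjugate_matrix, List.range_one, h1, detA_nil]

theorem signedPerms_nil : signedPerms [] = [(1, [])] := by
  rw [signedPerms]; rfl

theorem signedPerms_one : signedPerms [0] = [(1, [0])] := by
  rw [signedPerms, if_neg (by simp)]
  rw [show (List.range ([0] : List Nat).length) = [0] from rfl]
  rw [flatMap_attach_eq [0] (fun i =>
    (signedPerms (([0] : List Nat).take i ++ ([0] : List Nat).drop (i + 1))).map
      (fun sp => ((-1 : Int) ^ i * sp.1, ([0] : List Nat).getD i 0 :: sp.2)))]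
  rw [List.flatMap_cons, List.flatMap_nil]
  rw [show (([0] : List Nat).take 0 ++ ([0] : List Nat).drop 1) = [] from rfl]
  rw [signedPerms_nil]
  rfl

theorem main_eq_zero (A : List (List Int)) (hn : A.length = 0) :
    adjugate_matrix A = adjugate_matrix_alt A := by
  have hA : A = [] := List.length_eq_zero_iff.mp hn
  subst hA
  have h : signedPerms (List.range ([] : List (List Int)).length) = [(1, [])] :=
    signedPerms_nil
  unfold adjugate_matrix adjugate_matrix_alt
  rw [h]
  rfl


theorem adj_alt_one (r : List Int) : adjugate_matrix_alt [r] = [[1]] := by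
  unfold adjugate_matrix_alt
  rw [show ([r] : List (List Int)).length = 1 from rfl]
  rw [show (List.range 1) = [0] from rfl]
  rw [signedPerms_one]
  rfl

-- ===== VERDICT (by name: the statement is the Claim_ definition above) =====
theorem adjugate_matrix_spec : Claim_unchanged_adjugate_matrix := by
  intro A _ _ hnD
  unfold D_adjugate_matrix at hnD
  show adjugate_matrix A = adjugate_matrix_alt A
  match hln : A.length with
  | 0 => exact main_eq_zero A hln
  | 1 => exact absurd hln hnD
  | (m + 2) => exact main_eq A m hln

theorem adjugate_matrix_changed : Claim_changed_adjugate_matrix := by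
  unfold Claim_changed_adjugate_matrix pvDiffWitness_adjugate_matrix
    pvDiffWitnessOut_adjugate_matrix
  refine ⟨by decide, ?_, by decide, adj_one [5], adj_alt_one [5], by decide⟩
  intro r hr
  simp at hr
  simp [hr]

theorem adjugate_matrix_tight : Claim_exact_adjugate_matrix := by
  intro A _ _ hD heq
  unfold D_adjugate_matrix at hD
  match A, hD with
  | [r], _ =>
    rw [adj_one, adj_alt_one] at heq
    simp at heq
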